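-- pv_equiv track=rewrite | github.com/pberezow/Kryptografia2020 | lcg.py | determine_lcg_parameters
-- ===== SOURCE A (Python) =====
-- from functools import reduce
-- from math import gcd
--
-- def _determine_increment(states, modulus, multiplier):
--     increment = (states[1] - states[0] * multiplier) % modulus
--     return increment
--
-- def extended_gcd(a, b):
--     """
--     Extended Euclidean algorithm
--     """
--     if a == 0:
--         return (b, 0, 1)
--     else:
--         gcd, x, y = extended_gcd(b % a, a)
--         return (gcd, y - (b // a) * x, x)
--
-- def mod_inv(a, m):
--     """
--     Modular multiplicative inverse
--     """
--     a %= m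
--     gcd, x, _ = extended_gcd(a, m)
--     if gcd == 1:
--         return x % m
--     else:
--         raise Exception('Modular inverse does not exist.')
--
-- def _determine_multiplier(states, modulus):
--     multiplier = (states[2] - states[1]) * mod_inv(states[1] - states[0], modulus) % modulus
--     return multiplier
--
-- def _determine_modulus(states):
--     diffs = [s1 - s0 for s0, s1 in zip(states, states[1:])]
--     zeroes = [t2*t0 - t1*t1 for t0, t1, t2 in zip(diffs, diffs[1:], diffs[2:])]
--     modulus = abs(reduce(gcd, zeroes))
--     return modulus
--
-- def determine_lcg_parameters(states):
--     assert type(states) == list and len(states) >= 5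
--     for i in states:
--         assert type(i) == int
--
--     m = _determine_modulus(states)
--     a = _determine_multiplier(states, m)
--     c = _determine_increment(states, m, a)
--     return (m, a, c)
-- ===== SOURCE B (Python) =====
-- from math import gcd
--
--
-- def _mod_inv_iter(a, m):
--     # iterative extended Euclid, tracking only the Bezout coefficient of a
--     a %= m
--     old_r, r = a, m
--     old_s, s = 1, 0
--     while r != 0:
--         q = old_r // r
--         old_r, r = r, old_r - q * r
--         old_s, s = s, old_s - q * s
--     if old_r == 1:
--         return old_s % m
--     raise Exception('Modular inverse does not exist.')
--
--
-- def determine_lcg_parameters(states):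
--     assert type(states) == list and len(states) >= 5
--     for i in states:
--         assert type(i) == int
--
--     ds = [s1 - s0 for s0, s1 in zip(states, states[1:])]
--     # streaming gcd over the second-difference determinants
--     d0, d1 = ds[0], ds[1]
--     m = 0
--     for d2 in ds[2:]:
--         m = gcd(m, d2 * d0 - d1 * d1)
--         d0, d1 = d1, d2
--     a = (states[2] - states[1]) * _mod_inv_iter(states[1] - states[0], m) % m
--     c = (states[1] - states[0] * a) % m
--     return (m, a, c)
-- ===== Notes on version B (the rewrite author's own statement) =====
-- stated objective: alternative
-- what changed: The recursive extended_gcd is replaced by an iterative extended-Euclidean loop that maintains (old_r, r)/(old_s, s) pairs and tracks only the needed Bezout coefficient, and the zip/zip/reduce modulus pipeline is replaced by a single streaming pass that slides a pair of consecutive differences while accumulating a running gcd.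
import Mathlib
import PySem

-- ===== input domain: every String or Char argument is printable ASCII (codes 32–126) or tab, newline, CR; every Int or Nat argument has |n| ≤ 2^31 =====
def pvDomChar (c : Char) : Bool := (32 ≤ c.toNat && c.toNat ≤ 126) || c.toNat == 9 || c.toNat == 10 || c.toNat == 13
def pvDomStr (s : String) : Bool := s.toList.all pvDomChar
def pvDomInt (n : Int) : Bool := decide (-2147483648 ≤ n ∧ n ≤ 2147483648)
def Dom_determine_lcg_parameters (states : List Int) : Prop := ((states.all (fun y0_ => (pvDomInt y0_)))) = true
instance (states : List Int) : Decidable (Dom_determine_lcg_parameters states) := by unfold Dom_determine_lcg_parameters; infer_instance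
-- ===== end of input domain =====

-- B replaces A's recursive extended_gcd by an iterative extended-Euclid loop (tracking only the
-- needed Bezout coefficient) and the zip/zip/reduce modulus step by one streaming gcd pass
-- (objective: alternative decomposition, same cost).

-- ===== PORT A =====
-- helper extended_gcd(a, b); Python mod/floordiv; terminates since |b % a| < |a| for a ≠ 0
def extended_gcd (a b : Int) : Int × Int × Int :=
  if h : a = 0 then (b, 0, 1)
  else
    let r := extended_gcd (PySem.Int.mod b a) a
    (r.1, r.2.2 - (PySem.Int.floordiv b a) * r.2.1, r.2.1)
termination_by a.natAbs
decreasing_by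
  rcases lt_or_gt_of_ne h with hn | hp
  · have hb := PySem.Int.mod_neg_bounds b hn
    omega
  · have h1 := PySem.Int.mod_nonneg b hp
    have h2 := PySem.Int.mod_lt b hp
    omega

-- helper mod_inv(a, m): 'none' = the Python 'raise Exception(...)' branch (outside Pre_);
-- the Python 'a %= m' raises ZeroDivisionError for m = 0, also outside Pre_.
def mod_inv (a m : Int) : Option Int :=
  let a' := PySem.Int.mod a m
  let r := extended_gcd a' m
  if r.1 = 1 then some (PySem.Int.mod r.2.1 m) else none

-- helper _determine_modulus; the [] branch = Python's reduce() on an empty list (raises,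
-- unreachable under the length ≥ 5 assert)
def _determine_modulus (states : List Int) : Int :=
  let diffs := (states.zip (states.drop 1)).map (fun p => p.2 - p.1)
  let zeroes := ((diffs.zip (diffs.drop 1)).zip (diffs.drop 2)).map
      (fun p => p.2 * p.1.1 - p.1.2 * p.1.2)
  match zeroes with
  | [] => 0
  | z :: zs => ((zs.foldl (fun g z => (Int.gcd g z : Int)) z).natAbs : Int)

-- helper _determine_multiplier; 'none' propagates mod_inv's exception
def _determine_multiplier (states : List Int) (modulus : Int) : Option Int :=
  (mod_inv (PySem.List.pyGetD states 1 0 - PySem.List.pyGetD states 0 0) modulus).map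
    (fun inv => PySem.Int.mod ((PySem.List.pyGetD states 2 0 - PySem.List.pyGetD states 1 0) * inv) modulus)

-- helper _determine_increment
def _determine_increment (states : List Int) (modulus multiplier : Int) : Int :=
  PySem.Int.mod (PySem.List.pyGetD states 1 0 - PySem.List.pyGetD states 0 0 * multiplier) modulus

-- the assert (len < 5) and the mod_inv exception make Python raise: those inputs are outside Pre_,
-- the (0,0,0) results are just totalisation junk
def determine_lcg_parameters (states : List Int) : Int × Int × Int :=
  if states.length < 5 then (0, 0, 0)
  else
    let m := _determine_modulus states
    match _determine_multiplier states m with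
    | none => (0, 0, 0)
    | some a => (m, a, _determine_increment states m a)

-- ===== PORT B =====
-- B's while-loop: state (old_r, r, old_s, s); terminates since |old_r - (old_r//r)*r| = |old_r % r| < |r|
def egcd_loop (old_r r old_s s : Int) : Int × Int :=
  if h : r = 0 then (old_r, old_s)
  else
    let q := PySem.Int.floordiv old_r r
    egcd_loop r (old_r - q * r) s (old_s - q * s)
termination_by r.natAbs
decreasing_by
  have hm := PySem.Int.floordiv_mul_add_mod old_r r
  have : old_r - PySem.Int.floordiv old_r r * r = PySem.Int.mod old_r r := by omega
  rw [this]
  rcases lt_or_gt_of_ne h with hn | hp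
  · have hb := PySem.Int.mod_neg_bounds old_r hn
    omega
  · have h1 := PySem.Int.mod_nonneg old_r hp
    have h2 := PySem.Int.mod_lt old_r hp
    omega

-- helper _mod_inv_iter; 'none' = the Python raise branch (outside Pre_)
def _mod_inv_iter (a m : Int) : Option Int :=
  let a' := PySem.Int.mod a m
  let p := egcd_loop a' m 1 0
  if p.1 = 1 then some (PySem.Int.mod p.2 m) else none

def determine_lcg_parameters_alt (states : List Int) : Int × Int × Int :=
  if states.length < 5 then (0, 0, 0)
  else
    let ds := (states.zip (states.drop 1)).map (fun p => p.2 - p.1)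
    let m : Int :=
      match ds with
      | d0 :: d1 :: rest =>
        (rest.foldl (fun (st : Int × Int × Int) d2 =>
            (st.2.1, d2, (Int.gcd st.2.2 (d2 * st.1 - st.2.1 * st.2.1) : Int))) (d0, d1, 0)).2.2
      | _ => 0    -- unreachable for length ≥ 5 (Python ds[0] would raise IndexError)
    match _mod_inv_iter (PySem.List.pyGetD states 1 0 - PySem.List.pyGetD states 0 0) m with
    | none => (0, 0, 0)
    | some inv =>
      let a := PySem.Int.mod ((PySem.List.pyGetD states 2 0 - PySem.List.pyGetD states 1 0) * inv) m
      let c := PySem.Int.mod (PySem.List.pyGetD states 1 0 - PySem.List.pyGetD states 0 0 * a) m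
      (m, a, c)

-- ===== PRECONDITION & SPEC =====
-- closed-form modulus of the input: gcd of the second-difference determinants
def pvZeroes (states : List Int) : List Int :=
  let ds := (states.zip (states.drop 1)).map (fun p => p.2 - p.1)
  ((ds.zip (ds.drop 1)).zip (ds.drop 2)).map (fun p => p.2 * p.1.1 - p.1.2 * p.1.2)

def pvM (states : List Int) : Int :=
  (((pvZeroes states).foldr (fun z g => Nat.gcd z.natAbs g) 0 : Nat) : Int)

-- Pre_ excludes exactly the inputs where Python A raises: fewer than 5 states (assert),
-- recovered modulus 0 (ZeroDivisionError in mod_inv), and a non-invertible first difference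
-- (the explicit 'Modular inverse does not exist' Exception).
def Pre_determine_lcg_parameters (states : List Int) : Prop :=
  5 ≤ states.length ∧ pvM states ≠ 0 ∧
    Int.gcd (PySem.List.pyGetD states 1 0 - PySem.List.pyGetD states 0 0) (pvM states) = 1
instance (states : List Int) : Decidable (Pre_determine_lcg_parameters states) := by
  unfold Pre_determine_lcg_parameters; infer_instance

def pvWitness_determine_lcg_parameters : List Int := [0, 1, 4, 5, 0, 1]

def Spec_determine_lcg_parameters (states : List Int) (out : Int × Int × Int) : Prop := out = determine_lcg_parameters_alt states
instance (states : List Int) (out : Int × Int × Int) : Decidable (Spec_determine_lcg_parameters states out) := by unfold Spec_determine_lcg_parameters; infer_instance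

-- ===== CLAIM (what is proved, stated in full; the proofs are below) =====
def Claim_equal_determine_lcg_parameters : Prop := ∀ (states : List Int), Dom_determine_lcg_parameters states → Pre_determine_lcg_parameters states → Spec_determine_lcg_parameters states (determine_lcg_parameters states)

-- ===== LEMMAS AND PROOFS =====

-- the zeroes list generated from a sliding pair, the shape B's streaming pass follows
def zlist (d0 d1 : Int) : List Int → List Int
  | [] => []
  | d2 :: t => (d2 * d0 - d1 * d1) :: zlist d1 d2 t

theorem extended_gcd_zero (b : Int) : extended_gcd 0 b = (b, 0, 1) := by
  rw [extended_gcd]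
  simp

theorem extended_gcd_ne (a b : Int) (h : a ≠ 0) :
    extended_gcd a b =
      ((extended_gcd (PySem.Int.mod b a) a).1,
        (extended_gcd (PySem.Int.mod b a) a).2.2 -
          (PySem.Int.floordiv b a) * (extended_gcd (PySem.Int.mod b a) a).2.1,
        (extended_gcd (PySem.Int.mod b a) a).2.1) := by
  rw [extended_gcd]
  simp [h]

theorem egcd_loop_eq (A B s0 s1 : Int) :
    egcd_loop A B s0 s1 =
      ((extended_gcd B A).1,
        s0 * (extended_gcd B A).2.2 + s1 * (extended_gcd B A).2.1) := by
  fun_induction egcd_loop A B s0 s1 with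
  | case1 A s0 s1 =>
    rw [extended_gcd_zero]
    simp
  | case2 A B s0 s1 h q ih =>
    have he : A - q * B = PySem.Int.mod A B := by
      have h2 := PySem.Int.floordiv_mul_add_mod A B
      simp only [q]
      omega
    rw [ih, he, extended_gcd_ne B A h]
    simp only [q]
    ring_nf

theorem mod_of_mod_self (a m : Int) (hm : m ≠ 0) :
    PySem.Int.floordiv (PySem.Int.mod a m) m = 0 ∧
      PySem.Int.mod (PySem.Int.mod a m) m = PySem.Int.mod a m := by
  have heq := PySem.Int.floordiv_mul_add_mod (PySem.Int.mod a m) m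
  rcases lt_or_gt_of_ne hm with hn | hp
  · have hb1 := PySem.Int.mod_neg_bounds a hn
    have hb2 := PySem.Int.mod_neg_bounds (PySem.Int.mod a m) hn
    set q := PySem.Int.floordiv (PySem.Int.mod a m) m with hq
    have hq0 : q = 0 := by
      rcases lt_trichotomy q 0 with h | h | h
      · nlinarith
      · exact h
      · nlinarith
    refine ⟨hq0, ?_⟩
    rw [hq0] at heq
    omega
  · have hb1a := PySem.Int.mod_nonneg a hp
    have hb1b := PySem.Int.mod_lt a hp
    have hb2a := PySem.Int.mod_nonneg (PySem.Int.mod a m) hp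
    have hb2b := PySem.Int.mod_lt (PySem.Int.mod a m) hp
    set q := PySem.Int.floordiv (PySem.Int.mod a m) m with hq
    have hq0 : q = 0 := by
      rcases lt_trichotomy q 0 with h | h | h
      · nlinarith
      · exact h
      · nlinarith
    refine ⟨hq0, ?_⟩
    rw [hq0] at heq
    omega

theorem egcd_swap (a m : Int) (hm : m ≠ 0) :
    extended_gcd m (PySem.Int.mod a m) =
      ((extended_gcd (PySem.Int.mod a m) m).1,
        (extended_gcd (PySem.Int.mod a m) m).2.2,
        (extended_gcd (PySem.Int.mod a m) m).2.1) := by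
  obtain ⟨hd, hmm⟩ := mod_of_mod_self a m hm
  rw [extended_gcd_ne m (PySem.Int.mod a m) hm, hmm, hd]
  simp

theorem mod_inv_iter_eq (a m : Int) (hm : m ≠ 0) : _mod_inv_iter a m = mod_inv a m := by
  show (if (egcd_loop (PySem.Int.mod a m) m 1 0).1 = 1
        then some (PySem.Int.mod (egcd_loop (PySem.Int.mod a m) m 1 0).2 m) else none) =
      (if (extended_gcd (PySem.Int.mod a m) m).1 = 1
        then some (PySem.Int.mod (extended_gcd (PySem.Int.mod a m) m).2.1 m) else none)
  rw [egcd_loop_eq, egcd_swap a m hm]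
  simp

theorem zip_zeroes_eq (d0 d1 : Int) (l : List Int) :
    (((d0 :: d1 :: l).zip ((d0 :: d1 :: l).drop 1)).zip ((d0 :: d1 :: l).drop 2)).map
        (fun p => p.2 * p.1.1 - p.1.2 * p.1.2) = zlist d0 d1 l := by
  induction l generalizing d0 d1 with
  | nil => simp [zlist]
  | cons d2 t ih =>
    have h := ih d1 d2
    simp only [List.drop, List.zip_cons_cons, List.map_cons] at h ⊢
    rw [zlist, ← h]

theorem foldB_eq (l : List Int) (d0 d1 mAcc : Int) :
    (l.foldl (fun (st : Int × Int × Int) d2 =>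
        (st.2.1, d2, (Int.gcd st.2.2 (d2 * st.1 - st.2.1 * st.2.1) : Int))) (d0, d1, mAcc)).2.2 =
      (zlist d0 d1 l).foldl (fun g z => (Int.gcd g z : Int)) mAcc := by
  induction l generalizing d0 d1 mAcc with
  | nil => rfl
  | cons d2 t ih => simpa [zlist] using ih d1 d2 _

theorem foldA_eq (zs : List Int) (z0 : Int) :
    (((zs.foldl (fun g z => (Int.gcd g z : Int)) z0).natAbs : Int)) =
      (z0 :: zs).foldl (fun g z => (Int.gcd g z : Int)) 0 := by
  induction zs generalizing z0 with
  | nil => simp [Int.gcd]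
  | cons z tl ih =>
    simp only [List.foldl_cons]
    rw [ih]
    simp [List.foldl_cons, Int.gcd, Int.natAbs_abs]

theorem foldr_gcd_pull (tl : List Int) (g x : Nat) :
    tl.foldr (fun z g => Nat.gcd z.natAbs g) (Nat.gcd g x) =
      Nat.gcd x (tl.foldr (fun z g => Nat.gcd z.natAbs g) g) := by
  induction tl generalizing g with
  | nil => exact Nat.gcd_comm g x
  | cons w t ih => simp [ih, Nat.gcd_left_comm]

theorem pvM_eq_foldl (zs : List Int) (g : Nat) :
    zs.foldl (fun g z => (Int.gcd g z : Int)) (g : Int) =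
      ((zs.foldr (fun z g => Nat.gcd z.natAbs g) g : Nat) : Int) := by
  induction zs generalizing g with
  | nil => rfl
  | cons z tl ih =>
    simp only [List.foldl_cons, List.foldr_cons]
    have : (Int.gcd (g : Int) z : Int) = ((Nat.gcd g z.natAbs : Nat) : Int) := by simp [Int.gcd]
    rw [this, ih, foldr_gcd_pull]

-- ===== VERDICT (by name: the statement is the Claim_ definition above) =====
theorem modA_eq (states : List Int) (d0 d1 : Int) (rest : List Int)
    (hE : (states.zip (states.drop 1)).map (fun p => p.2 - p.1) = d0 :: d1 :: rest) :
    _determine_modulus states = (zlist d0 d1 rest).foldl (fun g z => (Int.gcd g z : Int)) 0 := by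
  unfold _determine_modulus
  rw [hE]
  simp only [zip_zeroes_eq]
  cases hz : zlist d0 d1 rest with
  | nil => rfl
  | cons z0 zs => simp only [foldA_eq, List.foldl_cons]

theorem determine_lcg_parameters_spec : Claim_equal_determine_lcg_parameters := by
  intro states _hdom hpre
  obtain ⟨hlen, hm0, hg⟩ := hpre
  unfold Spec_determine_lcg_parameters determine_lcg_parameters determine_lcg_parameters_alt
  have hnot : ¬ states.length < 5 := by omega
  rw [if_neg hnot, if_neg hnot]
  have hdslen : ((states.zip (states.drop 1)).map (fun p => p.2 - p.1)).length
      = states.length - 1 := by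
    simp [List.length_zip]
  rcases hE : (states.zip (states.drop 1)).map (fun p => p.2 - p.1) with _ | ⟨d0, _ | ⟨d1, rest⟩⟩
  · rw [hE] at hdslen; simp at hdslen; omega
  · rw [hE] at hdslen; simp at hdslen; omega
  · have hA := modA_eq states d0 d1 rest hE
    have hpv : pvM states = (zlist d0 d1 rest).foldl (fun g z => (Int.gcd g z : Int)) 0 := by
      unfold pvM pvZeroes
      rw [hE]
      simp only [zip_zeroes_eq]
      exact_mod_cast (pvM_eq_foldl (zlist d0 d1 rest) 0).symm
    have hmne : _determine_modulus states ≠ 0 := by rw [hA, ← hpv]; exact hm0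
    rw [hE]
    dsimp only
    rw [foldB_eq, ← hA, mod_inv_iter_eq _ _ hmne]
    unfold _determine_multiplier _determine_increment
    cases h : mod_inv (PySem.List.pyGetD states 1 0 - PySem.List.pyGetD states 0 0)
        (_determine_modulus states) with
    | none => simp
    | some inv => simp
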